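-- pv_equiv track=rewrite | github.com/frmi/nc-discord-bot | bot.py | skew_data
-- ===== SOURCE A (Python) =====
-- import math
--
-- def skew_data(distances, number_of_segments):
--     ret = []
--     dlen = len(distances)
--     segment_size = math.ceil(dlen/number_of_segments)
--     segments = [distances[i * segment_size:(i+1) * segment_size] for i in range(number_of_segments)]
--     for i, segment in enumerate(segments, start=1):
--         for element in segment:
--             for _ in range(i):
--                 ret.append(element)
--     return ret
-- ===== SOURCE B (Python) =====
-- def skew_data(distances, number_of_segments):
--     segment_size = -(-len(distances) // number_of_segments)  # == math.ceil(len/n)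
--     ret = []
--     for i, element in enumerate(distances):
--         ret.extend([element] * (i // segment_size + 1))
--     return ret
-- ===== Notes on version B (the rewrite author's own statement) =====
-- stated objective: simpler
-- what changed: Drops the intermediate list of slice segments and the triple nested loop: a single enumerate pass computes each element's repetition count as i // segment_size + 1 by flat index arithmetic.
-- outside the precondition, e.g. on skew_data([1, 2, 3], -2): A returns [], B returns [1]
import Mathlib
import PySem

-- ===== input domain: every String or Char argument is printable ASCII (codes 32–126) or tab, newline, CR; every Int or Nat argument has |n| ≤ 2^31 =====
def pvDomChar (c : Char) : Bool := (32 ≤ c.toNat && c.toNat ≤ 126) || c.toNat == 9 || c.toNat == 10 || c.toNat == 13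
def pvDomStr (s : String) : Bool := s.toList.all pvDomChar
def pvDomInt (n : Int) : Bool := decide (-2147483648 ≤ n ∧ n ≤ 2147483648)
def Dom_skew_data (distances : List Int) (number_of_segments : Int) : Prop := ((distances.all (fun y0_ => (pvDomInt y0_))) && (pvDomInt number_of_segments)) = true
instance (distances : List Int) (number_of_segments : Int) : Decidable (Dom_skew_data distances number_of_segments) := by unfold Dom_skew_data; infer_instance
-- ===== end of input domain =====

-- B drops A's intermediate list of slice segments and triple nested loop: one enumerate
-- pass computes each element's repetition count as i // segment_size + 1 (simpler).


-- ===== PORT A =====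
-- math.ceil(dlen/number_of_segments) is ported as the exact integer ceiling
-- -((-dlen) // number_of_segments): exact for these magnitudes (list length < 2^53).
def skew_data (distances : List Int) (number_of_segments : Int) : List Int :=
  let dlen : Int := distances.length
  let segment_size : Int := -(PySem.Int.floordiv (-dlen) number_of_segments)
  let segments : List (List Int) :=
    (PySem.List.pyRange 0 number_of_segments 1).map
      (fun i => PySem.List.slice distances (some (i * segment_size)) (some ((i + 1) * segment_size)))
  -- `for i, segment in enumerate(segments, start=1)`: the index i is carried in the fold state
  (segments.foldl
    (fun (st : List Int × Int) segment =>
      (segment.foldl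
        (fun ret element =>
          (PySem.List.pyRange 0 st.2 1).foldl (fun ret _ => ret ++ [element]) ret)
        st.1,
       st.2 + 1))
    ([], 1)).1

-- ===== PORT B =====
def skew_data_alt (distances : List Int) (number_of_segments : Int) : List Int :=
  let segment_size : Int := -(PySem.Int.floordiv (-(distances.length : Int)) number_of_segments)
  -- `for i, element in enumerate(distances)`: the index i is carried in the fold state
  (distances.foldl
    (fun (st : List Int × Int) element =>
      (st.1 ++ PySem.List.pyRepeat [element] (PySem.Int.floordiv st.2 segment_size + 1), st.2 + 1))
    ([], 0)).1

-- ===== PRECONDITION & SPEC =====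
-- Pre_ excludes non-positive segment counts, which are outside the function's natural
-- domain: at 0 A raises ZeroDivisionError, and for a negative count with nonempty data
-- A's [] (empty range of segments) and B's value are both artefacts of an unspecified
-- corner; negative counts with empty data (both return []) stay inside.
def Pre_skew_data (distances : List Int) (number_of_segments : Int) : Prop :=
  1 ≤ number_of_segments ∨ (number_of_segments < 0 ∧ distances = [])
instance (distances : List Int) (number_of_segments : Int) : Decidable (Pre_skew_data distances number_of_segments) := by unfold Pre_skew_data; infer_instance

def pvWitness_skew_data : List Int × Int := ([1, 2, 3], 2)

def Spec_skew_data (distances : List Int) (number_of_segments : Int) (out : List Int) : Prop := out = skew_data_alt distances number_of_segments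
instance (distances : List Int) (number_of_segments : Int) (out : List Int) : Decidable (Spec_skew_data distances number_of_segments out) := by unfold Spec_skew_data; infer_instance

-- ===== CLAIM (what is proved, stated in full; the proofs are below) =====
def Claim_equal_skew_data : Prop := ∀ (distances : List Int) (number_of_segments : Int), Dom_skew_data distances number_of_segments → Pre_skew_data distances number_of_segments → Spec_skew_data distances number_of_segments (skew_data distances number_of_segments)

-- ===== LEMMAS AND PROOFS =====

-- A's nested-loop result, written segment by segment (c = 1-based segment number).
def Aform (c : Nat) : List (List Int) → List Int
  | [] => []
  | seg :: rest => seg.flatMap (fun e => List.replicate c e) ++ Aform (c + 1) rest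

-- B's result, written position by position (j = absolute index, s = segment size).
def Bform (s j : Nat) : List Int → List Int
  | [] => []
  | x :: rest => List.replicate (j / s + 1) x ++ Bform s (j + 1) rest

-- A's innermost loop appends `element` once per loop iteration.
theorem foldl_append_const (e : Int) :
    ∀ (l : List Int) (ret : List Int),
      l.foldl (fun r _ => r ++ [e]) ret = ret ++ List.replicate l.length e := by
  intro l
  induction l with
  | nil => intro ret; simp
  | cons x xs ih =>
      intro ret
      simp only [List.foldl, ih, List.length_cons]
      simp [List.replicate_succ, List.append_assoc]

-- A's middle loop over one segment.
theorem A_inner (i : Int) :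
    ∀ (seg ret : List Int),
      seg.foldl
        (fun ret element =>
          (PySem.List.pyRange 0 i 1).foldl (fun r _ => r ++ [element]) ret) ret
        = ret ++ seg.flatMap (fun e => List.replicate i.toNat e) := by
  intro seg
  induction seg with
  | nil => intro ret; simp
  | cons x xs ih =>
      intro ret
      simp only [List.foldl, List.flatMap_cons]
      rw [foldl_append_const, ih]
      simp [PySem.List.length_pyRange_one]

-- A's outer loop over the enumerated segments equals Aform.
theorem A_outer :
    ∀ (segs : List (List Int)) (c : Int), 0 ≤ c → ∀ (ret : List Int),
      (segs.foldl
        (fun (st : List Int × Int) segment =>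
          (segment.foldl
            (fun ret element =>
              (PySem.List.pyRange 0 st.2 1).foldl (fun ret _ => ret ++ [element]) ret)
            st.1,
           st.2 + 1))
        (ret, c)).1
        = ret ++ Aform c.toNat segs := by
  intro segs
  induction segs with
  | nil => intro c _ ret; simp [Aform]
  | cons seg rest ih =>
      intro c hc ret
      lift c to Nat using hc with k
      simp only [List.foldl]
      rw [A_inner (k : Int)]
      have hk : ((k : Int) + 1) = ((k + 1 : Nat) : Int) := by push_cast; ring
      rw [hk, ih _ (by positivity)]
      simp [Aform]

-- B's loop equals Bform.
theorem B_eq (s : Nat) :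
    ∀ (xs : List Int) (j : Int), 0 ≤ j → ∀ (ret : List Int),
      (xs.foldl
        (fun (st : List Int × Int) element =>
          (st.1 ++ PySem.List.pyRepeat [element] (PySem.Int.floordiv st.2 (s : Int) + 1), st.2 + 1))
        (ret, j)).1
        = ret ++ Bform s j.toNat xs := by
  intro xs
  induction xs with
  | nil => intro j _ ret; simp [Bform]
  | cons x rest ih =>
      intro j hj ret
      lift j to Nat using hj with k
      simp only [List.foldl]
      have hk : ((k : Int) + 1) = ((k + 1 : Nat) : Int) := by push_cast; ring
      have hfd : PySem.Int.floordiv (k : Int) (s : Int) + 1 = ((k / s + 1 : Nat) : Int) := by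
        rw [PySem.Int.floordiv_natCast]; push_cast; ring
      rw [hk, ih _ (by positivity), hfd, PySem.List.pyRepeat_singleton]
      simp only [Int.toNat_natCast]
      have hB : Bform s k (x :: rest)
          = List.replicate (k / s + 1) x ++ Bform s (k + 1) rest := rfl
      rw [hB, ← List.append_assoc]

-- Bform consumes one segment's worth of positions: starting inside segment j at
-- offset o, every element up to the segment boundary gets j + 1 copies.
theorem Bform_seg (s : Nat) (hs : 1 ≤ s) (j : Nat) :
    ∀ (xs : List Int) (o : Nat), o < s →
      Bform s (j * s + o) xs
        = (xs.take (s - o)).flatMap (fun e => List.replicate (j + 1) e)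
          ++ Bform s ((j + 1) * s) (xs.drop (s - o)) := by
  intro xs
  induction xs with
  | nil => intro o _; simp [Bform]
  | cons x rest ih =>
      intro o ho
      have hdiv : (j * s + o) / s = j := by
        rw [Nat.add_comm, Nat.mul_comm, Nat.add_mul_div_left _ _ (by omega : 0 < s),
          Nat.div_eq_of_lt ho, Nat.zero_add]
      have htk : s - o = (s - o - 1) + 1 := by omega
      rw [htk, List.take_succ_cons, List.drop_succ_cons]
      simp only [Bform, hdiv, List.flatMap_cons, List.append_assoc]
      congr 1
      by_cases hlast : o + 1 = s
      · have h0 : s - o - 1 = 0 := by omega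
        have h1 : j * s + o + 1 = (j + 1) * s := by rw [Nat.add_mul, Nat.one_mul]; omega
        simp [h0, h1]
      · have h1 : j * s + o + 1 = j * s + (o + 1) := by omega
        have h2 : s - o - 1 = s - (o + 1) := by omega
        rw [h1, h2, ih (o + 1) (by omega)]

-- Main: A's segment-by-segment form equals B's position-by-position form, when the
-- segment size s is positive and m segments cover the whole list.
theorem main_lemma (s : Nat) (hs : 1 ≤ s) :
    ∀ (m j : Nat) (xs : List Int), xs.length ≤ m * s →
      Aform (j + 1) ((List.range m).map (fun i => (xs.drop (i * s)).take s))
        = Bform s (j * s) xs := by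
  intro m
  induction m with
  | zero =>
      intro j xs hlen
      rw [Nat.zero_mul] at hlen
      have hxs : xs = [] := List.eq_nil_of_length_eq_zero (by omega)
      simp [hxs, Aform, Bform]
  | succ m ih =>
      intro j xs hlen
      rw [List.range_succ_eq_map, List.map_cons, List.map_map]
      have hcomp :
          ((fun i => (xs.drop (i * s)).take s) ∘ Nat.succ)
            = fun i => ((xs.drop s).drop (i * s)).take s := by
        funext i
        simp only [Function.comp]
        rw [List.drop_drop]
        congr 2
        rw [Nat.succ_mul]
        omega
      rw [hcomp]
      simp only [Aform, Nat.zero_mul, List.drop_zero]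
      have hlen' : (xs.drop s).length ≤ m * s := by
        rw [Nat.succ_mul] at hlen
        simp only [List.length_drop]
        omega
      rw [ih (j + 1) (xs.drop s) hlen']
      have hsplit := Bform_seg s hs j xs 0 (by omega)
      simp only [Nat.add_zero, Nat.sub_zero] at hsplit
      rw [hsplit]

-- Aform of all-empty segments is empty.
theorem Aform_all_nil : ∀ (segs : List (List Int)) (c : Nat),
    (∀ seg ∈ segs, seg = ([] : List Int)) → Aform c segs = [] := by
  intro segs
  induction segs with
  | nil => intro c _; simp [Aform]
  | cons seg rest ih =>
      intro c h
      simp [Aform, h seg (by simp), ih (c + 1) (fun t ht => h t (by simp [ht]))]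

-- ===== VERDICT (by name: the statement is the Claim_ definition above) =====
theorem skew_data_spec : Claim_equal_skew_data := by
  intro distances n _ hpre
  unfold Spec_skew_data
  simp only [skew_data, skew_data_alt]
  rcases hpre with hn | ⟨hneg, hnil⟩
  · -- 1 ≤ n
    by_cases hd : distances = []
    · -- empty data: every segment is empty, both sides are []
      subst hd
      rw [A_outer _ 1 (by omega)]
      simp only [List.foldl_nil, List.nil_append]
      exact Aform_all_nil _ _ (by
        intro seg hseg
        simp only [List.mem_map] at hseg
        obtain ⟨i, _, rfl⟩ := hseg
        simp [PySem.List.slice])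
    · -- nonempty data: segment size is positive and the segments cover the list
      set d : Nat := distances.length with hdd
      have hd1 : 1 ≤ d := by
        cases distances with
        | nil => exact absurd rfl hd
        | cons a l => simp [hdd]
      set ss : Int := -(PySem.Int.floordiv (-(d : Int)) n) with hss
      have hbounds : (ss - 1) * n < (d : Int) ∧ (d : Int) ≤ ss * n :=
        (PySem.Int.neg_floordiv_neg_eq_iff_of_pos (by omega)).mp rfl
      have hd1' : (1 : Int) ≤ (d : Int) := by exact_mod_cast hd1
      have hss1 : 1 ≤ ss := by
        by_contra h
        push Not at h
        have h2 : ss * n ≤ 0 := mul_nonpos_iff.mpr (Or.inr ⟨by omega, by omega⟩)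
        linarith [hbounds.2]
      have hcast : ((ss.toNat : Int)) = ss := Int.toNat_of_nonneg (by omega)
      set s : Nat := ss.toNat with hsn
      have hs1 : 1 ≤ s := by omega
      have hncast : ((n.toNat : Int)) = n := Int.toNat_of_nonneg (by omega)
      -- the segments cover the list
      have hcover : d ≤ n.toNat * s := by
        have : (d : Int) ≤ (n.toNat : Int) * (s : Int) := by
          rw [hncast, hcast]
          calc (d : Int) ≤ ss * n := hbounds.2
            _ = n * ss := by ring
        exact_mod_cast this
      -- rewrite A's range of segment starts
      have hrange : PySem.List.pyRange 0 n 1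
          = (List.range n.toNat).map (fun k : Nat => ((k : Nat) : Int)) := by
        rw [← hncast]; exact PySem.List.pyRange_zero_natCast n.toNat
      rw [hrange, List.map_map]
      have hmap :
          ((fun i => PySem.List.slice distances (some (i * ss)) (some ((i + 1) * ss)))
              ∘ fun k : Nat => ((k : Nat) : Int))
            = fun k : Nat => (distances.drop (k * s)).take s := by
        funext k
        simp only [Function.comp]
        have e1 : (k : Int) * ss = ((k * s : Nat) : Int) := by push_cast [hcast]; ring
        have e2 : ((k : Int) + 1) * ss = ((k * s + s : Nat) : Int) := by push_cast [hcast]; ring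
        rw [e1, e2, PySem.List.slice_natCast]
        congr 1
        omega
      rw [hmap, A_outer _ 1 (by omega)]
      have hA := main_lemma s hs1 n.toNat 0 distances (by rw [← hdd]; exact hcover)
      simp only [Nat.zero_add, Nat.zero_mul] at hA
      have h1t : (1 : Int).toNat = 0 + 1 := rfl
      rw [List.nil_append, h1t, hA]
      -- B's side
      rw [← hcast, B_eq s distances 0 (by omega), List.nil_append]
      rfl
  · -- n < 0 and distances = []
    subst hnil
    rw [PySem.List.pyRange_one_eq_nil (by omega)]
    simp
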